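-- pv_equiv track=rewrite | github.com/db213/Solving-Equations-over-Free-Groups | constraint_solver/solver/generator.py | _invert_constant
-- ===== SOURCE A (Python) =====
-- def _invert_constant(constant):
--     inverted = ''
--     negated = False
--     for i in range(len(constant) - 1, -1, -1):
--         letter = constant[i]
--         if letter == '*':
--             negated = True
--             continue
--         inverted += letter
--         if not negated:
--             inverted += '*'
--         negated = False
--     return inverted
-- ===== SOURCE B (Python) =====
-- def _invert_constant(constant):
--     # Tokenize forward into letter-with-optional-star tokens (stray '*' are skipped),
--     # then reverse and flip each token's star.
--     tokens = []
--     i = 0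
--     n = len(constant)
--     while i < n:
--         if constant[i] == '*':
--             i += 1
--         elif i + 1 < n and constant[i + 1] == '*':
--             tokens.append((constant[i], True))
--             i += 2
--         else:
--             tokens.append((constant[i], False))
--             i += 1
--     return ''.join(c if starred else c + '*' for (c, starred) in reversed(tokens))
-- ===== Notes on version B (the rewrite author's own statement) =====
-- stated objective: alternative
-- what changed: Replaced the backward character loop with a carried negation flag by a forward tokenizer into (letter, starred) pairs followed by a reverse-and-map-join pass.
import Mathlib
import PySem

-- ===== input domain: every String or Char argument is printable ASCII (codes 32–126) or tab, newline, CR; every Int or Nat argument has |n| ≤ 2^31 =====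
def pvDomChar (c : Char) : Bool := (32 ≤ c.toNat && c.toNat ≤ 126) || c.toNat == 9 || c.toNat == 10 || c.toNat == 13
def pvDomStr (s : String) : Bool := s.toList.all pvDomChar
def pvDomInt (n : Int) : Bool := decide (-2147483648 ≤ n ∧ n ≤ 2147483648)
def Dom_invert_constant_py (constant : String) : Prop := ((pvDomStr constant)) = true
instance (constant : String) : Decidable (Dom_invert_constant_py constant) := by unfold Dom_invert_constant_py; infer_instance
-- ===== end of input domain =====

-- B replaces A's backward carried-flag loop with a forward tokenizer plus a reverse/map/join pass (alternative decomposition, same cost).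

-- ===== PORT A =====
-- A's loop body: state (inverted, negated); branches in A's order.
def pvStep (st : List Char × Bool) (letter : Char) : List Char × Bool :=
  if letter = '*' then (st.1, true)
  else
    let inv := st.1 ++ [letter]
    let inv := if !st.2 then inv ++ ['*'] else inv
    (inv, false)

-- A iterates i = len-1 … 0 and reads constant[i]; ported as a foldl of pvStep
-- over the reversed char list with initial state ('', False).
def invert_constant_py (constant : String) : String :=
  String.ofList ((constant.toList.reverse.foldl pvStep ([], false)).1)

-- ===== PORT B =====
-- forward tokenizer: stray '*' skipped; a letter optionally consumes a following '*'
def pvTok : List Char → List (Char × Bool)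
  | [] => []
  | '*' :: xs => pvTok xs
  | c :: '*' :: xs => (c, true) :: pvTok xs
  | c :: xs => (c, false) :: pvTok xs

def invert_constant_py_alt (constant : String) : String :=
  String.ofList
    (((pvTok constant.toList).reverse.map
        (fun t => if t.2 then [t.1] else [t.1, '*'])).flatten)

-- ===== PRECONDITION & SPEC =====
def Spec_invert_constant_py (constant : String) (out : String) : Prop := out = invert_constant_py_alt constant
instance (constant : String) (out : String) : Decidable (Spec_invert_constant_py constant out) := by unfold Spec_invert_constant_py; infer_instance

-- ===== CLAIM (what is proved, stated in full; the proofs are below) =====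
def Claim_equal_invert_constant_py : Prop := ∀ (constant : String), Dom_invert_constant_py constant → Spec_invert_constant_py constant (invert_constant_py constant)

-- ===== LEMMAS AND PROOFS =====

-- A's loop as a structural recursion producing the output chars directly
def pvG : List Char → Bool → List Char
  | [], _ => []
  | c :: xs, neg =>
    if c = '*' then pvG xs true
    else (c :: (if !neg then ['*'] else [])) ++ pvG xs false

theorem pvFold_eq_pvG (rl : List Char) (p : List Char × Bool) :
    (rl.foldl pvStep p).1 = p.1 ++ pvG rl p.2 := by
  induction rl generalizing p with
  | nil => simp [pvG]
  | cons c xs ih =>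
    obtain ⟨acc, neg⟩ := p
    rw [List.foldl_cons, ih]
    by_cases h : c = '*' <;> cases neg <;>
      simp [pvStep, pvG, h]

-- the tokenizer A's loop implicitly computes, reading the reversed string
def pvRTok : List Char → Bool → List (Char × Bool)
  | [], _ => []
  | c :: xs, neg =>
    if c = '*' then pvRTok xs true
    else (c, neg) :: pvRTok xs false

theorem pvG_eq_rtok (l : List Char) (neg : Bool) :
    pvG l neg
      = ((pvRTok l neg).map (fun t => if t.2 then [t.1] else [t.1, '*'])).flatten := by
  induction l generalizing neg with
  | nil => simp [pvG, pvRTok]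
  | cons c xs ih =>
    by_cases h : c = '*' <;> cases neg <;>
      simp [pvG, pvRTok, h, ih]

def pvNegAfter : List Char → Bool → Bool
  | [], b => b
  | c :: xs, _ => pvNegAfter xs (c = '*')

theorem pvRTok_append (ys zs : List Char) (b : Bool) :
    pvRTok (ys ++ zs) b = pvRTok ys b ++ pvRTok zs (pvNegAfter ys b) := by
  induction ys generalizing b with
  | nil => simp [pvRTok, pvNegAfter]
  | cons c xs ih =>
    by_cases h : c = '*' <;> simp [pvRTok, pvNegAfter, h, ih]

theorem pvNegAfter_snoc (ys : List Char) (a : Char) (b : Bool) :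
    pvNegAfter (ys ++ [a]) b = decide (a = '*') := by
  induction ys generalizing b with
  | nil => simp [pvNegAfter]
  | cons c xs ih => simp [pvNegAfter, ih]

theorem pvRTok_reverse (l : List Char) :
    pvRTok l.reverse false = (pvTok l).reverse := by
  fun_induction pvTok l with
  | case1 => simp [pvRTok]
  | case2 xs ih =>
    rw [show ('*' :: xs).reverse = xs.reverse ++ ['*'] by simp,
        pvRTok_append, ih]
    simp [pvRTok]
  | case3 c xs h1 ih =>
    rw [show (c :: '*' :: xs).reverse = xs.reverse ++ ['*', c] by simp,
        pvRTok_append, ih]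
    have hc : c ≠ '*' := fun h => h1 h
    simp [pvRTok, hc]
  | case4 c xs h1 h2 ih =>
    have hc : c ≠ '*' := fun h => h1 h
    rw [show (c :: xs).reverse = xs.reverse ++ [c] by simp,
        pvRTok_append, ih]
    cases xs with
    | nil => simp [pvRTok, pvNegAfter, hc]
    | cons d rest =>
      have hd : d ≠ '*' := fun h => h2 rest (by rw [h])
      rw [show (d :: rest).reverse = rest.reverse ++ [d] by simp,
          pvNegAfter_snoc]
      simp [pvRTok, hc, hd]

-- ===== VERDICT (by name: the statement is the Claim_ definition above) =====
theorem invert_constant_py_spec : Claim_equal_invert_constant_py := by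
  intro constant _
  show _ = _
  unfold invert_constant_py invert_constant_py_alt
  rw [pvFold_eq_pvG, List.nil_append, pvG_eq_rtok, pvRTok_reverse]
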